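-- pv_equiv track=rewrite | github.com/sseongsukim/CodingTest | programmers/level2/41.py | solution
-- ===== SOURCE A (Python) =====
-- from collections import defaultdict
--
-- def solution(dirs):
--     x, y = 0, 0
--     answer = 0
--     q = defaultdict(list)
--     for d in dirs:
--         key = (x, y)
--         if d == "U":
--             y += 1
--             if y > 5:
--                 y = 5
--         elif d == "D":
--             y -= 1
--             if y < -5:
--                 y = -5
--         elif d == "R":
--             x += 1
--             if x > 5:
--                 x = 5
--         elif d == "L":
--             x -= 1
--             if x < -5:
--                 x = -5
--         value = (x, y)
--         if key == value:
--             continue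
--         if value not in q[key]:
--             answer += 1
--             q[key].append(value)
--             q[value].append(key)
--
--     return answer
-- ===== SOURCE B (Python) =====
-- def solution(dirs):
--     delta = {"U": (0, 1), "D": (0, -1), "R": (1, 0), "L": (-1, 0)}
--     pts = [(0, 0)]
--     for d in dirs:
--         dx, dy = delta.get(d, (0, 0))
--         x, y = pts[-1]
--         pts.append((max(-5, min(5, x + dx)), max(-5, min(5, y + dy))))
--     return len({(min(p, q), max(p, q)) for p, q in zip(pts, pts[1:]) if p != q})
-- ===== Notes on version B (the rewrite author's own statement) =====
-- stated objective: simpler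
-- what changed: Replaced the mutable symmetric defaultdict adjacency (with per-step list membership scans and double appends) by building the clamped path of points first and returning the size of one set comprehension of canonical (min,max)-sorted edges.
import Mathlib
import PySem

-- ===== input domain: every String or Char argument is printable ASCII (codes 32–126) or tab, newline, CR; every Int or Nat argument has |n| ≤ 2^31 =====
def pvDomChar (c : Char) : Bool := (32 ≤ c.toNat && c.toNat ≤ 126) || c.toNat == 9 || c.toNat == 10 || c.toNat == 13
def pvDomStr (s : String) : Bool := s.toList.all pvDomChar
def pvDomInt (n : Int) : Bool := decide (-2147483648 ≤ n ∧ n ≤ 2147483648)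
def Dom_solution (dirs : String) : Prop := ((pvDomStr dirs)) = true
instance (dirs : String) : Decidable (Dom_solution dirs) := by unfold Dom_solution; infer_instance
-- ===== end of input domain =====

-- B replaces A's mutable symmetric adjacency dict (per-step list-membership scan and double append)
-- by building the clamped path of points and taking the size of one set of canonical edges
-- (simpler decomposition; same overall cost).

-- ===== PORT A =====
-- one step of A's loop over a direction character; state (x, y, answer, q)
def pvStepA (st : Int × Int × Int × PySem.Dict (Int × Int) (List (Int × Int))) (d : Char) :
    Int × Int × Int × PySem.Dict (Int × Int) (List (Int × Int)) :=
  match st with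
  | (x, y, answer, q) =>
    let key := (x, y)
    let xy : Int × Int :=
      if d = 'U' then (x, if y + 1 > 5 then 5 else y + 1)
      else if d = 'D' then (x, if y - 1 < -5 then -5 else y - 1)
      else if d = 'R' then ((if x + 1 > 5 then 5 else x + 1), y)
      else if d = 'L' then ((if x - 1 < -5 then -5 else x - 1), y)
      else (x, y)
    let value := xy
    if key = value then (xy.1, xy.2, answer, q)
    else
      let q1 := if q.contains key then q else q.insert key []
      if value ∈ q1.getD key [] then (xy.1, xy.2, answer, q1)
      else
        let q2 := q1.insert key (q1.getD key [] ++ [value])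
        let q3 := q2.insert value (q2.getD value [] ++ [key])
        (xy.1, xy.2, answer + 1, q3)

def solution (dirs : String) : Int :=
  (dirs.toList.foldl pvStepA (0, 0, 0, PySem.Dict.empty)).2.2.1

-- ===== PORT B =====
def pvClamp (v : Int) : Int := max (-5) (min 5 v)

def pvDelta : PySem.Dict Char (Int × Int) :=
  PySem.Dict.ofList [('U', (0, 1)), ('D', (0, -1)), ('R', (1, 0)), ('L', (-1, 0))]

-- Python's lexicographic `<` on int pairs
def pvLtB (p q : Int × Int) : Bool := p.1 < q.1 || (p.1 == q.1 && p.2 < q.2)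

-- (min(p, q), max(p, q)) for tuples: min/max pick the later argument only when strictly smaller/greater
def pvNorm (p q : Int × Int) : (Int × Int) × (Int × Int) :=
  ((if pvLtB q p then q else p), (if pvLtB p q then q else p))

def solution_alt (dirs : String) : Int :=
  let pts := dirs.toList.foldl
    (fun pts d =>
      let dxy := pvDelta.getD d (0, 0)
      let p := pts.getLast!
      pts ++ [(pvClamp (p.1 + dxy.1), pvClamp (p.2 + dxy.2))])
    [((0 : Int), (0 : Int))]
  ((PySem.Set.ofList ((pts.zip pts.tail).filterMap
      (fun pq => if pq.1 ≠ pq.2 then some (pvNorm pq.1 pq.2) else none))).length : Int)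


-- ===== PRECONDITION & SPEC =====
def Spec_solution (dirs : String) (out : Int) : Prop := out = solution_alt dirs
instance (dirs : String) (out : Int) : Decidable (Spec_solution dirs out) := by unfold Spec_solution; infer_instance

-- ===== CLAIM (what is proved, stated in full; the proofs are below) =====
def Claim_equal_solution : Prop := ∀ (dirs : String), Dom_solution dirs → Spec_solution dirs (solution dirs)

-- ===== LEMMAS AND PROOFS =====
lemma pvDelta_mk : pvDelta = PySem.Dict.mk [('U', (0, 1)), ('D', (0, -1)), ('R', (1, 0)), ('L', (-1, 0))] := by rfl
lemma pvDelta_other (d : Char) (h1 : d ≠ 'U') (h2 : d ≠ 'D') (h3 : d ≠ 'R') (h4 : d ≠ 'L') :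
    pvDelta.getD d (0,0) = (0,0) := by
  simp [pvDelta_mk, PySem.Dict.getD_eq_get?_getD,
    Ne.symm h1, Ne.symm h2, Ne.symm h3, Ne.symm h4, PySem.Dict.get?]
-- pvNorm characterization
lemma pvNorm_eq_iff (a b c d : Int × Int) (hab : a ≠ b) (hcd : c ≠ d) :
    pvNorm a b = pvNorm c d ↔ (a = c ∧ b = d) ∨ (a = d ∧ b = c) := by
  obtain ⟨a1, a2⟩ := a; obtain ⟨b1, b2⟩ := b; obtain ⟨c1, c2⟩ := c; obtain ⟨d1, d2⟩ := d
  simp only [Prod.mk.injEq, ne_eq, not_and] at hab hcd ⊢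
  simp only [pvNorm, pvLtB, decide_eq_true_eq, Bool.or_eq_true, Bool.and_eq_true, beq_iff_eq]
  split_ifs <;> simp only [Prod.mk.injEq] <;> omega
def pvMoveB (p : Int × Int) (d : Char) : Int × Int :=
  let dxy := pvDelta.getD d (0, 0)
  (pvClamp (p.1 + dxy.1), pvClamp (p.2 + dxy.2))

lemma pvMoveB_mem (p : Int × Int) (d : Char) :
    -5 ≤ (pvMoveB p d).1 ∧ (pvMoveB p d).1 ≤ 5 ∧ -5 ≤ (pvMoveB p d).2 ∧ (pvMoveB p d).2 ≤ 5 := by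
  simp only [pvMoveB, pvClamp]; omega

lemma pvDelta_U : pvDelta.getD 'U' (0,0) = (0,1) := by decide
lemma pvDelta_D : pvDelta.getD 'D' (0,0) = (0,-1) := by decide
lemma pvDelta_R : pvDelta.getD 'R' (0,0) = (1,0) := by decide
lemma pvDelta_L : pvDelta.getD 'L' (0,0) = (-1,0) := by decide
lemma pvMove_eq (x y : Int) (hx1 : -5 ≤ x) (hx2 : x ≤ 5) (hy1 : -5 ≤ y) (hy2 : y ≤ 5) (d : Char) :
    (if d = 'U' then ((x, if y + 1 > 5 then 5 else y + 1) : Int × Int)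
      else if d = 'D' then (x, if y - 1 < -5 then -5 else y - 1)
      else if d = 'R' then ((if x + 1 > 5 then 5 else x + 1), y)
      else if d = 'L' then ((if x - 1 < -5 then -5 else x - 1), y)
      else (x, y)) = pvMoveB (x, y) d := by
  by_cases h1 : d = 'U'
  · subst h1; simp only [pvMoveB, pvDelta_U]
    simp [pvClamp, Prod.ext_iff]; constructor <;> omega
  by_cases h2 : d = 'D'
  · subst h2; simp only [pvMoveB, pvDelta_D]
    simp [pvClamp, Prod.ext_iff]; constructor <;> omega
  by_cases h3 : d = 'R'
  · subst h3; simp only [pvMoveB, pvDelta_R]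
    simp [pvClamp, Prod.ext_iff]; constructor <;> omega
  by_cases h4 : d = 'L'
  · subst h4; simp only [pvMoveB, pvDelta_L]
    simp [pvClamp, Prod.ext_iff]; constructor <;> omega
  · simp only [if_neg h1, if_neg h2, if_neg h3, if_neg h4, pvMoveB, pvDelta_other d h1 h2 h3 h4]
    simp [pvClamp, Prod.ext_iff]; constructor <;> omega
def pvPath (p : Int × Int) : List Char → List (Int × Int)
  | [] => [p]
  | d :: ds => p :: pvPath (pvMoveB p d) ds

lemma pvBuild (ds : List Char) : ∀ (pre : List (Int × Int)) (p : Int × Int),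
    ds.foldl (fun pts d =>
      let dxy := pvDelta.getD d (0, 0)
      let q := pts.getLast!
      pts ++ [(pvClamp (q.1 + dxy.1), pvClamp (q.2 + dxy.2))]) (pre ++ [p])
    = pre ++ pvPath p ds := by
  induction ds with
  | nil => intro pre p; simp [pvPath]
  | cons d ds ih =>
    intro pre p
    simp only [List.foldl_cons]
    have hlast : (pre ++ [p]).getLast! = p := by
      simp [List.getLast!_eq_getLast?_getD]
    rw [hlast]
    have heq : (pre ++ [p]) ++ [(pvClamp (p.1 + (pvDelta.getD d (0,0)).1), pvClamp (p.2 + (pvDelta.getD d (0,0)).2))]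
        = (pre ++ [p]) ++ [pvMoveB p d] := by simp [pvMoveB]
    rw [heq, ih (pre ++ [p]) (pvMoveB p d)]
    simp [pvPath]

def pvE (p : Int × Int) : List Char → List ((Int × Int) × (Int × Int))
  | [] => []
  | d :: ds =>
    let m := pvMoveB p d
    (if p = m then [] else [pvNorm p m]) ++ pvE m ds

lemma pvPath_ne_nil (p : Int × Int) (ds : List Char) : pvPath p ds ≠ [] := by
  cases ds <;> simp [pvPath]

lemma pvEdges (ds : List Char) : ∀ (p : Int × Int),
    ((pvPath p ds).zip (pvPath p ds).tail).filterMap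
      (fun pq => if pq.1 ≠ pq.2 then some (pvNorm pq.1 pq.2) else none) = pvE p ds := by
  induction ds with
  | nil => intro p; simp [pvPath, pvE]
  | cons d ds ih =>
    intro p
    have h := pvPath_ne_nil (pvMoveB p d) ds
    obtain ⟨m, rest, hmr⟩ : ∃ m rest, pvPath (pvMoveB p d) ds = m :: rest := by
      cases hpp : pvPath (pvMoveB p d) ds with
      | nil => exact absurd hpp h
      | cons m rest => exact ⟨m, rest, rfl⟩
    have hm : m = pvMoveB p d := by
      cases ds <;> simp [pvPath] at hmr <;> tauto
    subst hm
    simp only [pvPath, pvE, hmr, List.tail_cons, List.zip_cons_cons, List.filterMap_cons]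
    have hz : (pvMoveB p d :: rest).zip rest
        = (pvPath (pvMoveB p d) ds).zip (pvPath (pvMoveB p d) ds).tail := by rw [hmr]; rfl
    rw [hz, ih]
    by_cases hpm : p = pvMoveB p d
    · rw [if_neg (not_not_intro hpm), if_pos hpm]; rfl
    · rw [if_pos hpm, if_neg hpm]; rfl
lemma pvEnsure (q : PySem.Dict (Int × Int) (List (Int × Int))) (key : Int × Int) (a : Int × Int) :
    (if q.contains key then q else q.insert key []).getD a [] = q.getD a [] := by
  split
  · rfl
  · rename_i hc
    rw [PySem.Dict.getD_insert]
    split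
    · rename_i ha; subst ha
      exact (PySem.Dict.getD_of_not_contains q [] (by simpa using hc)).symm
    · rfl

lemma pvInvStep (key value : Int × Int) (hkv : key ≠ value)
    (q1 : PySem.Dict (Int × Int) (List (Int × Int))) (s : PySem.Set ((Int × Int) × (Int × Int)))
    (hinv : ∀ a b : Int × Int, a ≠ b → (b ∈ q1.getD a [] ↔ pvNorm a b ∈ s))
    (a b : Int × Int) (hab : a ≠ b) :
    (b ∈ ((q1.insert key (q1.getD key [] ++ [value])).insert value
        ((q1.insert key (q1.getD key [] ++ [value])).getD value [] ++ [key])).getD a []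
      ↔ pvNorm a b ∈ PySem.Set.add s (pvNorm key value)) := by
  rw [PySem.Set.mem_add, PySem.Dict.getD_insert]
  by_cases ha1 : a = value
  · rw [if_pos ha1, PySem.Dict.getD_insert, if_neg (Ne.symm hkv)]
    simp only [List.mem_append, List.mem_singleton]
    rw [show q1.getD value [] = q1.getD a [] from by rw [ha1],
      hinv a b hab, pvNorm_eq_iff a b key value hab hkv]
    constructor
    · rintro (h | h)
      · exact Or.inl h
      · exact Or.inr (Or.inr ⟨ha1, h⟩)
    · rintro (h | (⟨h1, h2⟩ | ⟨h1, h2⟩))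
      · exact Or.inl h
      · exact absurd (h1.symm.trans ha1) hkv
      · exact Or.inr h2
  · rw [if_neg ha1, PySem.Dict.getD_insert]
    by_cases ha2 : a = key
    · rw [if_pos ha2]
      simp only [List.mem_append, List.mem_singleton]
      rw [show q1.getD key [] = q1.getD a [] from by rw [ha2],
        hinv a b hab, pvNorm_eq_iff a b key value hab hkv]
      constructor
      · rintro (h | h)
        · exact Or.inl h
        · exact Or.inr (Or.inl ⟨ha2, h⟩)
      · rintro (h | (⟨h1, h2⟩ | ⟨h1, h2⟩))
        · exact Or.inl h
        · exact Or.inr h2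
        · exact absurd h1 ha1
    · rw [if_neg ha2, hinv a b hab, pvNorm_eq_iff a b key value hab hkv]
      constructor
      · exact Or.inl
      · rintro (h | (⟨h1, h2⟩ | ⟨h1, h2⟩))
        · exact h
        · exact absurd h1 ha2
        · exact absurd h1 ha1
lemma pvMain (ds : List Char) : ∀ (x y ans : Int) (q : PySem.Dict (Int × Int) (List (Int × Int)))
    (s : PySem.Set ((Int × Int) × (Int × Int))),
    -5 ≤ x → x ≤ 5 → -5 ≤ y → y ≤ 5 →
    ans = (s.length : Int) →
    (∀ a b : Int × Int, a ≠ b → (b ∈ q.getD a [] ↔ pvNorm a b ∈ s)) →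
    (ds.foldl pvStepA (x, y, ans, q)).2.2.1 = (((pvE (x, y) ds).foldl PySem.Set.add s).length : Int) := by
  induction ds with
  | nil => intro x y ans q s _ _ _ _ hans _; simpa [pvE] using hans
  | cons d ds ih =>
    intro x y ans q s hx1 hx2 hy1 hy2 hans hinv
    simp only [List.foldl_cons, pvStepA, pvE]
    rw [pvMove_eq x y hx1 hx2 hy1 hy2 d]
    set m := pvMoveB (x, y) d with hm
    obtain ⟨hm1, hm2, hm3, hm4⟩ := pvMoveB_mem (x, y) d
    by_cases hkv : (x, y) = m
    · rw [if_pos hkv, if_pos hkv]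
      simp only [List.nil_append]
      have := ih m.1 m.2 ans q s hm1 hm2 hm3 hm4 hans hinv
      rwa [Prod.mk.eta] at this
    · rw [if_neg hkv, if_neg hkv]
      have hq1 : ∀ a, (if q.contains (x, y) then q else q.insert (x, y) []).getD a []
          = q.getD a [] := pvEnsure q (x, y)
      by_cases hmem : m ∈ (if q.contains (x, y) then q else q.insert (x, y) []).getD (x, y) []
      · rw [if_pos hmem]
        have hes : pvNorm (x, y) m ∈ s := (hinv (x, y) m hkv).mp (by rwa [hq1] at hmem)
        simp only [List.singleton_append, List.foldl_cons, PySem.Set.add_of_mem hes]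
        have := ih m.1 m.2 ans _ s hm1 hm2 hm3 hm4 hans
          (fun a b hab => (hq1 a ▸ hinv a b hab : _))
        rwa [Prod.mk.eta] at this
      · rw [if_neg hmem]
        have hes : pvNorm (x, y) m ∉ s := fun h =>
          hmem (by rw [hq1]; exact (hinv (x, y) m hkv).mpr h)
        have hlen : ans + 1 = ((PySem.Set.add s (pvNorm (x, y) m)).length : Int) := by
          rw [PySem.Set.add_of_not_mem hes, List.length_append, List.length_singleton]
          push_cast [hans]; ring
        have hinv' := pvInvStep (x, y) m hkv _ _
          (fun a b hab => (hq1 a ▸ hinv a b hab : _))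
        simp only [List.singleton_append, List.foldl_cons]
        have := ih m.1 m.2 (ans + 1) _ _ hm1 hm2 hm3 hm4 hlen hinv'
        rwa [Prod.mk.eta] at this
theorem solution_eq_alt : ∀ dirs : String, solution dirs = solution_alt dirs := by
  intro dirs
  unfold solution solution_alt
  have hb := pvBuild dirs.toList [] (0, 0)
  simp only [List.nil_append] at hb
  simp only [hb]
  rw [pvEdges, PySem.Set.ofList_eq_foldl]
  exact pvMain dirs.toList 0 0 0 PySem.Dict.empty [] (by omega) (by omega) (by omega) (by omega)
    rfl (fun a b _ => by simp [PySem.Dict.getD_empty])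

-- ===== VERDICT (by name: the statement is the Claim_ definition above) =====
theorem solution_spec : Claim_equal_solution := by
  intro dirs _
  unfold Spec_solution
  exact solution_eq_alt dirs
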